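-- pv_equiv track=rewrite | github.com/tldms0327/Algorithm | 프로그래머스/level3_110옮기기.py | f
-- ===== SOURCE A (Python) =====
-- def f(x):
--     left, I, IIO = '', 0, 0
--     for i in x:
--         if i == '1':
--             I += 1
--         elif I > 1:
--             I -= 2
--             IIO += 1
--         else:
--             left += '10' if I > 0 else '0'
--             I = 0
--     return left + '110' * IIO + '1' * I
-- ===== SOURCE B (Python) =====
-- def f(x):
--     stack, count = [], 0
--     for ch in x:
--         if ch == '1':
--             stack.append('1')
--         else:
--             stack.append('0')
--             if stack[-3:] == ['1', '1', '0']: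
--                 del stack[-3:]
--                 count += 1
--     i = len(stack)
--     while i > 0 and stack[i - 1] == '1':
--         i -= 1
--     return ''.join(stack[:i]) + '110' * count + ''.join(stack[i:])
-- ===== Notes on version B (the rewrite author's own statement) =====
-- stated objective: idiomatic
-- what changed: Replaces A's three-counter bookkeeping (prefix string, run-of-ones counter, pattern counter) by the idiomatic explicit stack that pushes each character and cancels a trailing ['1','1','0'] immediately, plus a post-loop scan for the trailing run of '1's.
import Mathlib
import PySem

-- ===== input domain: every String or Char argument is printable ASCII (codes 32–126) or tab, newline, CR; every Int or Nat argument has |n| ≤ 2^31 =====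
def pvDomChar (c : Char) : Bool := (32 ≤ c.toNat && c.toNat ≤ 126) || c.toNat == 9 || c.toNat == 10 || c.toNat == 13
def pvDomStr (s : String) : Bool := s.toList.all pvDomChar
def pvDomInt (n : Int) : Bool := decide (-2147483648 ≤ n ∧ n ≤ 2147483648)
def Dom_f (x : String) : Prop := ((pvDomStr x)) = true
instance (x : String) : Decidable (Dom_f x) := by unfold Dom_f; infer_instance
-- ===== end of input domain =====

-- B replaces A's three-counter bookkeeping by an explicit stack with immediate
-- 110-pattern cancellation and a post-loop trailing-ones scan (objective: idiomatic).

-- ===== PORT A =====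
-- one iteration of A's for-loop over (left, I, IIO)
def stepA (s : List Char × Int × Int) (i : Char) : List Char × Int × Int :=
  if i = '1' then (s.1, s.2.1 + 1, s.2.2)
  else if s.2.1 > 1 then (s.1, s.2.1 - 2, s.2.2 + 1)
  else (s.1 ++ (if s.2.1 > 0 then ['1', '0'] else ['0']), 0, s.2.2)

def f (x : String) : String :=
  let s := x.toList.foldl stepA ([], 0, 0)
  String.ofList (s.1 ++ (List.replicate s.2.2.toNat ['1', '1', '0']).flatten
               ++ List.replicate s.2.1.toNat '1')

-- ===== PORT B =====
-- one iteration of B's for-loop over (stack, count); stack[-3:] is drop (len-3)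
def stepB (s : List Char × Nat) (ch : Char) : List Char × Nat :=
  if ch = '1' then (s.1 ++ ['1'], s.2)
  else if (s.1 ++ ['0']).drop ((s.1 ++ ['0']).length - 3) = ['1', '1', '0'] then
    ((s.1 ++ ['0']).take ((s.1 ++ ['0']).length - 3), s.2 + 1)
  else (s.1 ++ ['0'], s.2)

def f_alt (x : String) : String :=
  let s := x.toList.foldl stepB ([], 0)
  let stack := s.1
  -- the while loop moves i left over the trailing run of '1's
  let i := stack.length - (stack.reverse.takeWhile (· = '1')).length
  String.ofList (stack.take i ++ (List.replicate s.2 ['1', '1', '0']).flatten ++ stack.drop i)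

-- ===== PRECONDITION & SPEC =====
def Spec_f (x : String) (out : String) : Prop := out = f_alt x
instance (x : String) (out : String) : Decidable (Spec_f x out) := by unfold Spec_f; infer_instance

-- ===== CLAIM (what is proved, stated in full; the proofs are below) =====
def Claim_equal_f : Prop := ∀ (x : String), Dom_f x → Spec_f x (f x)

-- ===== LEMMAS AND PROOFS =====

-- invariant tying A's state (left, I, IIO) to B's state (stack, count)
def InvAB (left : List Char) (I IIO : Int) (stack : List Char) (count : Nat) : Prop :=
  stack = left ++ List.replicate I.toNat '1' ∧ count = IIO.toNat ∧
  0 ≤ I ∧ 0 ≤ IIO ∧ (left = [] ∨ left.getLast? = some '0')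

-- if left is empty or ends in '0', left ++ X (X short, not ending 11?0) cannot end in ['1','1','0']
theorem no_pattern (left : List Char) (X : List Char)
    (hlast : left = [] ∨ left.getLast? = some '0')
    (hX : X = ['0'] ∨ X = ['1', '0']) :
    ¬ (left ++ X).drop ((left ++ X).length - 3) = ['1', '1', '0'] := by
  intro hd
  have hfull : left ++ X =
      (left ++ X).take ((left ++ X).length - 3) ++ ['1', '1', '0'] := by
    conv_lhs => rw [← List.take_append_drop ((left ++ X).length - 3) (left ++ X)]
    rw [hd]
  have hrev := congrArg List.reverse hfull
  rw [List.reverse_append, List.reverse_append] at hrev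
  simp only [List.reverse_cons, List.reverse_nil, List.nil_append, List.append_assoc] at hrev
  -- hrev : X.reverse ++ left.reverse = '0' :: '1' :: '1' :: (take …).reverse
  have hlrev : ∃ t, left.reverse = '1' :: t := by
    rcases hX with hX | hX <;> rw [hX] at hrev <;>
      simp only [List.reverse_cons, List.reverse_nil, List.nil_append,
        List.cons_append] at hrev
    · -- '0' :: left.reverse = '0' :: '1' :: '1' :: _
      exact ⟨_, (List.cons_eq_cons.mp hrev).2⟩
    · -- '0' :: '1' :: left.reverse = '0' :: '1' :: '1' :: _
      exact ⟨_, (List.cons_eq_cons.mp (List.cons_eq_cons.mp hrev).2).2⟩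
  obtain ⟨t, ht⟩ := hlrev
  rcases hlast with hl | hl
  · rw [hl] at ht; simp at ht
  · rw [← List.head?_reverse, ht] at hl
    simp at hl

theorem step_inv (left : List Char) (I IIO : Int) (stack : List Char) (count : Nat)
    (ch : Char) (h : InvAB left I IIO stack count) :
    InvAB (stepA (left, I, IIO) ch).1 (stepA (left, I, IIO) ch).2.1
        (stepA (left, I, IIO) ch).2.2 (stepB (stack, count) ch).1
        (stepB (stack, count) ch).2 := by
  obtain ⟨hs, hc, hI, hO, hlast⟩ := h
  by_cases h1 : ch = '1'
  · have eA : stepA (left, I, IIO) ch = (left, I + 1, IIO) := by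
      simp [stepA, h1]
    have eB : stepB (stack, count) ch = (stack ++ ['1'], count) := by
      simp [stepB, h1]
    rw [eA, eB]
    dsimp only
    refine ⟨?_, hc, by omega, hO, hlast⟩
    have : (I + 1).toNat = I.toNat + 1 := by omega
    simp [hs, this, List.replicate_succ']
  · by_cases h2 : I > 1
    · -- pattern case: stack ++ ['0'] ends with ['1','1','0']
      have hn : I.toNat = (I.toNat - 2) + 2 := by omega
      have hsplit : stack ++ ['0'] =
          (left ++ List.replicate (I.toNat - 2) '1') ++ ['1', '1', '0'] := by
        rw [hs, hn, List.replicate_add]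
        simp
      have hlen : (stack ++ ['0']).length - 3 =
          (left ++ List.replicate (I.toNat - 2) '1').length := by
        conv_lhs => rw [hsplit]
        simp
        omega
      have hdrop : (stack ++ ['0']).drop ((stack ++ ['0']).length - 3) = ['1', '1', '0'] := by
        rw [hlen]
        conv_lhs => rw [hsplit]
        rw [List.drop_left]
      have htake : (stack ++ ['0']).take ((stack ++ ['0']).length - 3) =
          left ++ List.replicate (I.toNat - 2) '1' := by
        rw [hlen]
        conv_lhs => rw [hsplit]
        rw [List.take_left]
      have eA : stepA (left, I, IIO) ch = (left, I - 2, IIO + 1) := by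
        simp [stepA, h1, h2]
      have eB : stepB (stack, count) ch =
          (left ++ List.replicate (I.toNat - 2) '1', count + 1) := by
        simp only [stepB, if_neg h1]
        rw [if_pos hdrop, htake]
      rw [eA, eB]
      dsimp only
      refine ⟨?_, ?_, by omega, by omega, hlast⟩
      · have : (I - 2).toNat = I.toNat - 2 := by omega
        rw [this]
      · have : (IIO + 1).toNat = IIO.toNat + 1 := by omega
        rw [this, hc]
    · -- no pattern: I.toNat is 0 or 1
      have hn : I.toNat = 0 ∨ I.toNat = 1 := by omega
      have hs2 : stack ++ ['0'] = left ++ (if I > 0 then ['1', '0'] else ['0']) := by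
        rcases hn with hn | hn
        · have : ¬ I > 0 := by omega
          simp [hs, hn, this]
        · have : I > 0 := by omega
          simp [hs, hn, this]
      have hnodrop : ¬ (stack ++ ['0']).drop ((stack ++ ['0']).length - 3) = ['1', '1', '0'] := by
        rw [hs2]
        exact no_pattern left _ hlast (by by_cases h0 : I > 0 <;> simp [h0])
      have eA : stepA (left, I, IIO) ch =
          (left ++ (if I > 0 then ['1', '0'] else ['0']), 0, IIO) := by
        simp [stepA, h1, h2]
      have eB : stepB (stack, count) ch =
          (left ++ (if I > 0 then ['1', '0'] else ['0']), count) := by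
        simp only [stepB, if_neg h1]
        rw [if_neg hnodrop, hs2]
      rw [eA, eB]
      dsimp only
      refine ⟨by simp, hc, by omega, hO, ?_⟩
      right
      by_cases h0 : I > 0 <;> simp [h0]

theorem fold_inv (cs : List Char) :
    ∀ (left : List Char) (I IIO : Int) (stack : List Char) (count : Nat),
    InvAB left I IIO stack count →
    InvAB (cs.foldl stepA (left, I, IIO)).1 (cs.foldl stepA (left, I, IIO)).2.1
        (cs.foldl stepA (left, I, IIO)).2.2 (cs.foldl stepB (stack, count)).1
        (cs.foldl stepB (stack, count)).2 := by
  induction cs with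
  | nil => intro left I IIO stack count h; simpa using h
  | cons c cs ih =>
    intro left I IIO stack count h
    have h' := step_inv left I IIO stack count c h
    have := ih (stepA (left, I, IIO) c).1 (stepA (left, I, IIO) c).2.1
      (stepA (left, I, IIO) c).2.2 (stepB (stack, count) c).1 (stepB (stack, count) c).2 h'
    simpa using this

theorem f_eq (x : String) : f x = f_alt x := by
  have h0 : InvAB [] 0 0 [] 0 := by simp [InvAB]
  have h := fold_inv x.toList [] 0 0 [] 0 h0
  unfold f f_alt
  set sA := x.toList.foldl stepA ([], 0, 0) with hA
  set sB := x.toList.foldl stepB ([], 0) with hB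
  obtain ⟨hs, hc, hI, hO, hlast⟩ := h
  -- the trailing-ones count of sB.1 is sA.2.1.toNat
  have hones : (sB.1.reverse.takeWhile (· = '1')).length = sA.2.1.toNat := by
    rw [hs]
    simp only [List.reverse_append, List.reverse_replicate, List.takeWhile_append]
    rcases hlast with hl | hl
    · simp [hl]
    · rw [← List.head?_reverse] at hl
      rcases hr : sA.1.reverse with _ | ⟨a, t⟩
      · simp
      · rw [hr] at hl
        simp only [List.head?_cons, Option.some.injEq] at hl
        simp [hl, List.takeWhile]
  have hi : sB.1.length - (sB.1.reverse.takeWhile (· = '1')).length = sA.1.length := by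
    rw [hones, hs]; simp
  have htake : sB.1.take sA.1.length = sA.1 := by rw [hs, List.take_left]
  have hdrop : sB.1.drop sA.1.length = List.replicate sA.2.1.toNat '1' := by
    rw [hs, List.drop_left]
  simp only [hi, htake, hdrop, hc]

-- ===== VERDICT (by name: the statement is the Claim_ definition above) =====
theorem f_spec : Claim_equal_f := by
  intro x _
  unfold Spec_f
  exact f_eq x
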